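-- pv_equiv track=rewrite | github.com/mdrahman1472/n-Queen-genetic-algorithm | Final solution/n-queen-GA.py | changeListToUnique
-- ===== SOURCE A (Python) =====
-- def changeListToUnique(l):
-- 	for num in l:
-- 		if l.count(num) > 1:
-- 			ix = l.index(num)
-- 			missing = [n for n in range(len(l)) if n not in set(l)]
-- 			try:
-- 				l[ix] = missing.pop(0)
-- 			except IndexError:
-- 				break
-- 	return l
-- ===== SOURCE B (Python) =====
-- def changeListToUnique(l):
--     n = len(l)
--     missing = sorted(set(range(n)) - set(l))
--     remaining = {}
--     for v in l:
--         remaining[v] = remaining.get(v, 0) + 1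
--     mi = 0
--     for i, v in enumerate(l):
--         remaining[v] -= 1
--         if remaining[v] > 0:
--             l[i] = missing[mi]
--             mi += 1
--     return l
-- ===== Notes on version B (the rewrite author's own statement) =====
-- stated objective: faster
-- what changed: A rescans the whole list (count, index, and a full missing-values rebuild) inside every loop iteration; B computes the element counts and the sorted missing values once and then does a single left-to-right pass that replaces each element that still re-occurs later with the next missing value.
import Mathlib
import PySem

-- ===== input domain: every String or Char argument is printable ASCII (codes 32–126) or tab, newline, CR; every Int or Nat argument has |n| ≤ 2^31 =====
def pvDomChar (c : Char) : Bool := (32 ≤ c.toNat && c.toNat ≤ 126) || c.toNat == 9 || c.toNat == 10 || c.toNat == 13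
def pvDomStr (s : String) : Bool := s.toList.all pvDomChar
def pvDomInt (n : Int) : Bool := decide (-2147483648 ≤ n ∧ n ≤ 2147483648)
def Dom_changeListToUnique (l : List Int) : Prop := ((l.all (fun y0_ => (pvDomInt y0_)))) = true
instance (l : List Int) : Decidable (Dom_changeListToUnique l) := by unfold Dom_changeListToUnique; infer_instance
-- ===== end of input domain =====

-- B replaces A's per-element rescans (count/index/missing list recomputed inside the loop) by one
-- counting pass plus a single left-to-right pass consuming a precomputed sorted missing list.
-- Both A and B mutate the argument list in place in Python; the equivalence proved here is about the
-- return value (B performs the same in-place mutation as A).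

-- ===== PORT A =====
-- loop body of A's 'for num in l' (iterating the list being mutated = index-based over the current list)
def aStep (st : List Int × Bool) (i : Int) : List Int × Bool :=
  if st.2 then st
  else
    let cur := st.1
    let num := PySem.List.pyGetD cur i 0
    if 1 < PySem.List.count cur num then
      let ix := (PySem.List.index? cur num).getD 0
      let missing := (PySem.List.pyRange 0 (cur.length : Int)).filter
          (fun m => !(PySem.Set.contains (PySem.Set.ofList cur) m))
      match missing with
      | [] => (cur, true)            -- missing.pop(0) raises IndexError → break
      | m :: _ => (cur.set ix m, st.2)
    else st

def changeListToUnique (l : List Int) : List Int :=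
  (List.foldl aStep (l, false) (PySem.List.pyRange 0 (l.length : Int))).1

-- ===== PORT B =====
-- loop body of B's enumerate pass; `missing` is the precomputed sorted missing list
def bStep (missing : List Int) (st : List Int × PySem.Dict Int Int × Nat) (p : Int × Int)
    : List Int × PySem.Dict Int Int × Nat :=
  let rem := st.2.1.insert p.2 (st.2.1.getD p.2 0 - 1)
  if 0 < rem.getD p.2 0 then
    (st.1 ++ [missing.getD st.2.2 0], rem, st.2.2 + 1)
  else
    (st.1 ++ [p.2], rem, st.2.2)

def changeListToUnique_alt (l : List Int) : List Int :=
  let missing := PySem.List.sorted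
    (PySem.Set.diff (PySem.Set.ofList (PySem.List.pyRange 0 (l.length : Int))) (PySem.Set.ofList l))
    (fun x => x)
  let remaining := l.foldl (fun d v => d.insert v (d.getD v 0 + 1)) PySem.Dict.empty
  (List.foldl (bStep missing) ([], remaining, 0) (PySem.List.enumerate l)).1

-- ===== PRECONDITION & SPEC =====
def Spec_changeListToUnique (l : List Int) (out : List Int) : Prop := out = changeListToUnique_alt l
instance (l : List Int) (out : List Int) : Decidable (Spec_changeListToUnique l out) := by unfold Spec_changeListToUnique; infer_instance

-- ===== CLAIM (what is proved, stated in full; the proofs are below) =====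
def Claim_equal_changeListToUnique : Prop := ∀ (l : List Int), Dom_changeListToUnique l → Spec_changeListToUnique l (changeListToUnique l)

-- ===== LEMMAS AND PROOFS =====

-- the common specification: scan left to right; an element that re-occurs later is replaced by the
-- next value of the missing list, an element occurring for the last time is kept
def sgo : List Int → List Int → List Int
  | [], _ => []
  | v :: rest, miss =>
    if v ∈ rest then miss.headD 0 :: sgo rest miss.tail
    else v :: sgo rest miss

-- the missing values of `cur` below bound `n`, in increasing order
def missOf (cur : List Int) (n : Int) : List Int :=
  (PySem.List.pyRange 0 n).filter (fun m => decide (m ∉ cur))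

lemma filter_set_eq (cur : List Int) :
    (PySem.List.pyRange 0 (cur.length : Int)).filter
        (fun m => !(PySem.Set.contains (PySem.Set.ofList cur) m))
      = missOf cur (cur.length : Int) := by
  apply List.filter_congr
  intro x _
  simp [PySem.Set.contains]

lemma missOf_pairwise (cur : List Int) (n : Int) : (missOf cur n).Pairwise (· < ·) :=
  (PySem.List.pairwise_lt_pyRange_one 0 n).filter _

-- pigeonhole: a length-n list with a repeated element misses some value of range(n)
lemma missOf_ne_nil (cur : List Int) (v : Int) (h2 : 2 ≤ List.count v cur) :
    missOf cur (cur.length : Int) ≠ [] := by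
  intro h
  have hsub : ∀ m ∈ PySem.List.pyRange 0 (cur.length : Int), m ∈ cur := by
    intro m hm
    by_contra hmem
    have := List.filter_eq_nil_iff.mp h m hm
    simp [hmem] at this
  have hnodup : (PySem.List.pyRange 0 (cur.length : Int)).Nodup :=
    PySem.List.nodup_pyRange_one 0 _
  have hlen : (PySem.List.pyRange 0 (cur.length : Int)).length = cur.length := by
    simp [PySem.List.length_pyRange_one]
  have hcard : cur.length ≤ cur.toFinset.card := by
    have hfs : (PySem.List.pyRange 0 (cur.length : Int)).toFinset ⊆ cur.toFinset := by
      intro m hm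
      simp only [List.mem_toFinset] at *
      exact hsub m hm
    have := Finset.card_le_card hfs
    rwa [List.toFinset_card_of_nodup hnodup, hlen] at this
  have hnd : ¬ cur.Nodup := by
    intro hnd
    rw [List.nodup_iff_count_le_one] at hnd
    have := hnd v
    omega
  have hlt : cur.toFinset.card < cur.length := by
    rw [List.card_toFinset]
    have hsl := List.dedup_sublist cur
    have hle := hsl.length_le
    rcases lt_or_eq_of_le hle with h' | h'
    · exact h'
    · exact absurd (hsl.eq_of_length h' ▸ cur.nodup_dedup) hnd
  omega

-- replacing the head duplicate by the least missing value consumes exactly that value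
lemma missOf_update (pre tail : List Int) (v m : Int) (miss' : List Int) (n : Int)
    (hv : v ∈ tail)
    (hmiss : missOf (pre ++ v :: tail) n = m :: miss')
    (hpw : (m :: miss').Pairwise (· < ·)) :
    missOf (pre ++ m :: tail) n = miss' := by
  have hpt : ∀ x : Int, (decide (x ∉ pre ++ m :: tail))
      = (decide (x ≠ m) && decide (x ∉ pre ++ v :: tail)) := by
    intro x
    by_cases hx : x = m
    · subst hx; simp
    · by_cases hxc : x ∈ pre ++ v :: tail
      · have : x ∈ pre ++ m :: tail := by
          rcases List.mem_append.mp hxc with h | h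
          · exact List.mem_append.mpr (Or.inl h)
          · rcases List.mem_cons.mp h with h | h
            · exact List.mem_append.mpr (Or.inr (List.mem_cons_of_mem _ (h ▸ hv)))
            · exact List.mem_append.mpr (Or.inr (List.mem_cons_of_mem _ h))
        simp [hxc, this]
      · have : x ∉ pre ++ m :: tail := by
          intro hc
          apply hxc
          rcases List.mem_append.mp hc with h | h
          · exact List.mem_append.mpr (Or.inl h)
          · rcases List.mem_cons.mp h with h | h
            · exact absurd h hx
            · exact List.mem_append.mpr (Or.inr (List.mem_cons_of_mem _ h))
        simp [hxc, this, hx]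
  have h1 : missOf (pre ++ m :: tail) n
      = (missOf (pre ++ v :: tail) n).filter (fun x => decide (x ≠ m)) := by
    unfold missOf
    rw [List.filter_filter]
    exact List.filter_congr (fun x _ => hpt x)
  rw [h1, hmiss]
  have hm : ∀ y ∈ miss', m < y := fun y hy => List.rel_of_pairwise_cons hpw hy
  simp only [List.filter_cons]
  have : (decide (m ≠ m)) = false := by simp
  rw [this]
  simp only [Bool.false_eq_true, if_neg (by simp : ¬ False)]
  apply List.filter_eq_self.mpr
  intro y hy
  simpa using ne_of_gt (hm y hy)

-- A's loop, processed from position pre.length on state pre ++ rest, appends sgo rest miss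
lemma A_go (n : Nat) : ∀ (rest pre miss : List Int),
    pre.length + rest.length = n →
    (∀ x ∈ pre, x ∉ rest) →
    missOf (pre ++ rest) (n : Int) = miss →
    miss.Pairwise (· < ·) →
    (List.foldl aStep (pre ++ rest, false) (PySem.List.pyRange (pre.length : Int) (n : Int))).1
      = pre ++ sgo rest miss := by
  intro rest
  induction rest with
  | nil =>
    intro pre miss hlen hdis hmiss hpw
    simp only [List.length_nil] at hlen
    have hle : (n : Int) ≤ (pre.length : Int) := by exact_mod_cast Nat.le_of_eq (by omega)
    rw [PySem.List.pyRange_one_eq_nil hle]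
    simp [sgo]
  | cons v tail ih =>
    intro pre miss hlen hdis hmiss hpw
    simp only [List.length_cons] at hlen
    have hlt : (pre.length : Int) < (n : Int) := by exact_mod_cast (by omega : pre.length < n)
    rw [PySem.List.pyRange_one_cons hlt, List.foldl_cons]
    have hvpre : v ∉ pre := fun hc => hdis v hc (List.mem_cons_self)
    have hnum : PySem.List.pyGetD (pre ++ v :: tail) (pre.length : Int) 0 = v := by
      rw [PySem.List.pyGetD_natCast]
      simp [List.getD_eq_getElem?_getD]
    have hcnt : PySem.List.count (pre ++ v :: tail) v = (List.count v tail) + 1 := by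
      rw [PySem.List.count_eq]
      simp [List.count_append, List.count_eq_zero_of_not_mem hvpre]
    have hlencur : ((pre ++ v :: tail).length : Int) = (n : Int) := by
      simp only [List.length_append, List.length_cons]
      exact_mod_cast (by omega : pre.length + (tail.length + 1) = n)
    by_cases hv : v ∈ tail
    · have hc1 : 1 < PySem.List.count (pre ++ v :: tail) v := by
        have := List.count_pos_iff.mpr hv
        omega
      have hix : PySem.List.index? (pre ++ v :: tail) v = some pre.length :=
        (PySem.List.index?_eq_some_iff _ _ _).mpr ⟨pre, tail, rfl, rfl, hvpre⟩
      have hmne : miss ≠ [] := by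
        rw [← hmiss]
        have h2 : 2 ≤ List.count v (pre ++ v :: tail) := by
          rw [PySem.List.count_eq] at hcnt
          have := List.count_pos_iff.mpr hv
          omega
        have := missOf_ne_nil (pre ++ v :: tail) v h2
        rwa [hlencur] at this
      obtain ⟨m, miss', rfl⟩ := List.exists_cons_of_ne_nil hmne
      have hmcur : m ∉ pre ++ v :: tail := by
        have hm : m ∈ missOf (pre ++ v :: tail) (n : Int) := by
          rw [hmiss]; exact List.mem_cons_self
        unfold missOf at hm
        simpa using (List.mem_filter.mp hm).2
      have hset : (pre ++ v :: tail).set pre.length m = pre ++ m :: tail := by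
        rw [List.set_append_right _ _ (le_refl pre.length)]
        simp
      have hstep : aStep (pre ++ v :: tail, false) (pre.length : Int) = (pre ++ m :: tail, false) := by
        unfold aStep
        simp only [hnum, hc1, if_true, hix]
        rw [filter_set_eq, hlencur, hmiss]
        simp [hset]
      rw [hstep]
      have hmiss2 : missOf ((pre ++ [m]) ++ tail) (n : Int) = miss' := by
        rw [List.append_assoc]
        exact missOf_update pre tail v m miss' _ hv hmiss hpw
      have hdis2 : ∀ x ∈ pre ++ [m], x ∉ tail := by
        intro x hx
        rcases List.mem_append.mp hx with h | h
        · exact fun hc => hdis x h (List.mem_cons_of_mem _ hc)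
        · rw [List.mem_singleton] at h
          subst h
          exact fun hc => hmcur (List.mem_append.mpr (Or.inr (List.mem_cons_of_mem _ hc)))
      have hlen2 : (pre ++ [m]).length + tail.length = n := by simp; omega
      have := ih (pre ++ [m]) miss' hlen2 hdis2 hmiss2 (List.Pairwise.of_cons hpw)
      have hcast : ((pre ++ [m]).length : Int) = (pre.length : Int) + 1 := by simp
      rw [hcast, List.append_assoc] at this
      simp only [List.singleton_append] at this
      rw [this]
      simp [sgo, hv]
    · have hstep : aStep (pre ++ v :: tail, false) (pre.length : Int) = (pre ++ v :: tail, false) := by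
        unfold aStep
        simp only [hnum]
        simp
        intro h
        rw [List.count_eq_zero_of_not_mem hvpre, List.count_eq_zero_of_not_mem hv] at h
        omega
      rw [hstep]
      have hmiss2 : missOf ((pre ++ [v]) ++ tail) (n : Int) = miss := by
        rw [List.append_assoc, List.singleton_append]
        exact hmiss
      have hdis2 : ∀ x ∈ pre ++ [v], x ∉ tail := by
        intro x hx
        rcases List.mem_append.mp hx with h | h
        · exact fun hc => hdis x h (List.mem_cons_of_mem _ hc)
        · rw [List.mem_singleton] at h
          subst h
          exact hv
      have hlen2 : (pre ++ [v]).length + tail.length = n := by simp; omega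
      have := ih (pre ++ [v]) miss hlen2 hdis2 hmiss2 hpw
      have hcast : ((pre ++ [v]).length : Int) = (pre.length : Int) + 1 := by simp
      rw [hcast, List.append_assoc] at this
      simp only [List.singleton_append] at this
      rw [this]
      simp [sgo, hv]

-- B's loop over the remaining suffix appends sgo of that suffix with the unconsumed missing values
lemma B_go (missing : List Int) : ∀ (rest : List Int) (s : Int) (acc : List Int)
    (rem : PySem.Dict Int Int) (mi : Nat),
    (∀ v, rem.getD v 0 = (List.count v rest : Int)) →
    (List.foldl (bStep missing) (acc, rem, mi) (PySem.List.enumerate rest s)).1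
      = acc ++ sgo rest (missing.drop mi) := by
  intro rest
  induction rest with
  | nil => intro s acc rem mi h; simp [PySem.List.enumerate, sgo]
  | cons v tail ih =>
    intro s acc rem mi h
    rw [PySem.List.enumerate_cons]
    have hv : (rem.insert v (rem.getD v 0 - 1)).getD v 0 = (List.count v tail : Int) := by
      rw [PySem.Dict.getD_insert, h v]
      simp [List.count_cons]
    have hrem' : ∀ u, (rem.insert v (rem.getD v 0 - 1)).getD u 0 = (List.count u tail : Int) := by
      intro u
      rw [PySem.Dict.getD_insert]
      by_cases hu : u = v
      · simp [hu, h v, List.count_cons]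
      · simp [hu, h u, List.count_cons, Ne.symm hu]
    by_cases hmem : v ∈ tail
    · have hcnt : (0:Int) < List.count v tail := by
        have : 0 < List.count v tail := List.count_pos_iff.mpr hmem
        exact_mod_cast this
      simp only [List.foldl_cons, bStep, hv]
      rw [if_pos hcnt]
      rw [ih (s+1) _ _ _ hrem']
      simp [sgo, hmem, List.tail_drop]
    · have hcnt : ¬ ((0:Int) < List.count v tail) := by
        simp [List.count_eq_zero_of_not_mem hmem]
      simp only [List.foldl_cons, bStep, hv]
      rw [if_neg hcnt]
      rw [ih (s+1) _ _ _ hrem']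
      simp [sgo, hmem]

-- B's precomputed sorted missing list is missOf
lemma miss_eq (l : List Int) :
    PySem.List.sorted
      (PySem.Set.diff (PySem.Set.ofList (PySem.List.pyRange 0 (l.length : Int))) (PySem.Set.ofList l))
      (fun x => x) = missOf l (l.length : Int) := by
  have hof : PySem.Set.ofList (PySem.List.pyRange 0 (l.length : Int)) = PySem.List.pyRange 0 (l.length : Int) :=
    PySem.Set.ofList_eq_self_of_nodup _ (PySem.List.nodup_pyRange_one 0 _)
  have hdiff : PySem.Set.diff (PySem.Set.ofList (PySem.List.pyRange 0 (l.length : Int))) (PySem.Set.ofList l)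
      = missOf l (l.length : Int) := by
    rw [PySem.Set.diff, hof, missOf]
    apply List.filter_congr
    intro x _
    simp [PySem.Set.contains]
  rw [hdiff]
  exact PySem.List.sorted_eq_of_perm_of_pairwise_lt _ _ _ (List.Perm.refl _) (missOf_pairwise l _)

lemma alt_eq_sgo (l : List Int) : changeListToUnique_alt l = sgo l (missOf l (l.length : Int)) := by
  unfold changeListToUnique_alt
  rw [miss_eq, PySem.Dict.foldl_insert_getD_add_one_eq_counter]
  rw [B_go _ l 0 [] _ 0 (fun v => PySem.Dict.getD_counter l v)]
  simp

lemma a_eq_sgo (l : List Int) : changeListToUnique l = sgo l (missOf l (l.length : Int)) := by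
  unfold changeListToUnique
  have := A_go l.length l [] (missOf l (l.length : Int)) (by simp) (by simp)
    (by simp) (missOf_pairwise l _)
  simpa using this

-- ===== VERDICT (by name: the statement is the Claim_ definition above) =====
theorem changeListToUnique_spec : Claim_equal_changeListToUnique := by
  intro l _
  unfold Spec_changeListToUnique
  rw [a_eq_sgo, alt_eq_sgo]
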